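-- pv_equiv track=rewrite | github.com/kmorgan31/adventofcode | 2015/day5.py | is_nice_1
-- ===== SOURCE A (Python) =====
-- def is_nice_1(word):
--     if any(x in word for x in ["ab", "cd", "pq", "xy"]):
--         return False
--     if sum(word.count(x) for x in "aeiou") < 3:
--         return False
--     if not any(word[i] == word[i+1] for i in range(len(word)-1)):
--         return False
--     return True
-- ===== SOURCE B (Python) =====
-- def is_nice_1(word):
--     # one fused pass: vowel count, double flag, early exit on a forbidden pair
--     vowels = 0
--     has_double = False
--     n = len(word)
--     for i in range(n):
--         c = word[i]
--         if c in 'aeiou':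
--             vowels += 1
--         if i + 1 < n:
--             d = word[i + 1]
--             if (c == 'a' and d == 'b') or (c == 'c' and d == 'd') \
--                     or (c == 'p' and d == 'q') or (c == 'x' and d == 'y'):
--                 return False
--             if c == d:
--                 has_double = True
--     return has_double and vowels >= 3
-- ===== Notes on version B (the rewrite author's own statement) =====
-- stated objective: alternative
-- what changed: A makes three separate scans (four substring searches, five full count() passes, then an index scan for doubles); B is a single fused pass over the string maintaining a vowel counter and a double flag, returning early at the first forbidden adjacent pair.
import Mathlib
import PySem

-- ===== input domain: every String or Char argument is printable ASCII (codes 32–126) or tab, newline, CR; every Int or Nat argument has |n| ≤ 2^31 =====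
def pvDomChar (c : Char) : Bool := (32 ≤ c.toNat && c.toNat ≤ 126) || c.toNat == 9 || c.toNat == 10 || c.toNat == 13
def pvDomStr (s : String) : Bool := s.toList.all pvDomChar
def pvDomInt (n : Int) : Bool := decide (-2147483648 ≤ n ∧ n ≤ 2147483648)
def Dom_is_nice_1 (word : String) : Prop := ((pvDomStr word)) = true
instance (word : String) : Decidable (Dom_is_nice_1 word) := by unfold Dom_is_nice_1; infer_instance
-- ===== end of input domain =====

-- B fuses A's three separate scans (substring searches, five count() passes, an index scan for doubles) into one pass with running state; alternative decomposition, equal asymptotic cost.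


-- ===== PORT A =====
-- any(x in word for x in ["ab","cd","pq","xy"]); sum(word.count(x) for x in "aeiou") < 3;
-- not any(word[i] == word[i+1] for i in range(len(word)-1)).
-- word[i] / word[i+1] are always in range under the range bound i < len-1, so pyGetD is exact here.
def is_nice_1 (word : String) : Bool :=
  if ["ab", "cd", "pq", "xy"].any (fun x => PySem.Str.isIn x word) then
    false
  else if (("aeiou".toList).map (fun x => PySem.Chars.count word.toList [x])).sum < 3 then
    false
  else if !((PySem.List.pyRange 0 ((PySem.Str.len word : Int) - 1) 1).any
      (fun i => PySem.List.pyGetD word.toList i ' ' == PySem.List.pyGetD word.toList (i + 1) ' ')) then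
    false
  else
    true

-- ===== PORT B =====
def pvVowel (c : Char) : Bool := c == 'a' || c == 'e' || c == 'i' || c == 'o' || c == 'u'

def pvBadPair (c d : Char) : Bool :=
  (c == 'a' && d == 'b') || (c == 'c' && d == 'd') || (c == 'p' && d == 'q') || (c == 'x' && d == 'y')

-- the fused loop of Source B: state = (vowel count, double flag), early False on a forbidden adjacent pair
def pvGoB : List Char → Nat → Bool → Bool
  | [], vowels, hasDouble => hasDouble && decide (3 ≤ vowels)
  | c :: rest, vowels, hasDouble =>
    let vowels' := if pvVowel c then vowels + 1 else vowels
    match rest with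
    | [] => hasDouble && decide (3 ≤ vowels')
    | d :: _ =>
      if pvBadPair c d then false
      else pvGoB rest vowels' (hasDouble || c == d)

def is_nice_1_alt (word : String) : Bool := pvGoB word.toList 0 false

-- ===== PRECONDITION & SPEC =====
def Spec_is_nice_1 (word : String) (out : Bool) : Prop := out = is_nice_1_alt word
instance (word : String) (out : Bool) : Decidable (Spec_is_nice_1 word out) := by unfold Spec_is_nice_1; infer_instance

-- ===== CLAIM (what is proved, stated in full; the proofs are below) =====
def Claim_equal_is_nice_1 : Prop := ∀ (word : String), Dom_is_nice_1 word → Spec_is_nice_1 word (is_nice_1 word)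

-- ===== LEMMAS AND PROOFS =====

-- the adjacent pairs of a list
def pvPairs (cs : List Char) : List (Char × Char) := cs.zip cs.tail

-- B's fused loop, characterised: early-exit on a bad pair, else double-flag and vowel-count totals
lemma pvGoB_eq (cs : List Char) : ∀ (v : Nat) (dbl : Bool),
    pvGoB cs v dbl =
      if (pvPairs cs).any (fun p => pvBadPair p.1 p.2) then false
      else (dbl || (pvPairs cs).any (fun p => p.1 == p.2)) && decide (3 ≤ v + cs.countP pvVowel) := by
  induction cs with
  | nil => simp [pvGoB, pvPairs]
  | cons c rest ih =>
    intro v dbl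
    cases rest with
    | nil =>
      simp only [pvGoB, pvPairs, List.zip, List.countP_cons, List.countP_nil]
      by_cases h : pvVowel c = true <;> simp [h]
    | cons d r =>
      have hstep : pvGoB (c :: d :: r) v dbl =
          if pvBadPair c d then false
          else pvGoB (d :: r) (if pvVowel c then v + 1 else v) (dbl || c == d) := rfl
      rw [hstep]
      by_cases hb : pvBadPair c d = true
      · simp [pvPairs, hb]
      · rw [if_neg (by simp [hb]), ih]
        have hp : pvPairs (c :: d :: r) = (c, d) :: pvPairs (d :: r) := rfl
        rw [hp]
        simp only [List.any_cons, hb, Bool.false_or, List.countP_cons]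
        by_cases hv : pvVowel c = true <;>
          simp [hv, Bool.or_assoc, Nat.add_comm, Nat.add_left_comm]

-- a two-character infix is exactly an adjacent pair
lemma pv_infix_pair (a b : Char) (cs : List Char) : ([a, b] <:+: cs) ↔ (a, b) ∈ pvPairs cs := by
  induction cs with
  | nil => simp [pvPairs]
  | cons c rest ih =>
    rw [List.infix_cons_iff]
    cases rest with
    | nil =>
      simp only [pvPairs]
      constructor
      · rintro (hpre | hinf)
        · have := hpre.length_le; simp at this
        · simp at hinf
      · intro h; simp at h
    | cons d r =>
      have hp : pvPairs (c :: d :: r) = (c, d) :: pvPairs (d :: r) := rfl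
      rw [hp]
      constructor
      · rintro (hpre | hinf)
        · rcases List.cons_prefix_cons.mp hpre with ⟨rfl, h2⟩
          rcases List.cons_prefix_cons.mp h2 with ⟨rfl, _⟩
          exact List.mem_cons_self
        · exact List.mem_cons_of_mem _ (ih.mp hinf)
      · intro hm
        rcases List.mem_cons.mp hm with h | h
        · obtain ⟨rfl, rfl⟩ := Prod.mk.inj h
          exact Or.inl (List.cons_prefix_cons.mpr ⟨rfl, List.cons_prefix_cons.mpr ⟨rfl, List.nil_prefix⟩⟩)
        · exact Or.inr (ih.mpr h)

-- word.count(x) for a single character is the character count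
lemma pv_count_singleton (c : Char) (cs : List Char) : PySem.Chars.count cs [c] = cs.count c := by
  have go : ∀ (fuel : Nat) (s : List Char) (acc : Nat), s.length ≤ fuel →
      PySem.Chars.count.go [c] fuel s acc = acc + s.count c := by
    intro fuel
    induction fuel with
    | zero => intro s acc h; cases s <;> simp [PySem.Chars.count.go] at *
    | succ f ih =>
      intro s acc h
      cases s with
      | nil => simp [PySem.Chars.count.go]
      | cons x t =>
        simp only [PySem.Chars.count.go]
        by_cases hx : x = c
        · subst hx
          have hpre : [x].isPrefixOf (x :: t) = true := by simp [List.isPrefixOf]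
          rw [hpre, if_pos rfl]
          simp only [List.length_singleton, List.drop_one, List.tail_cons]
          rw [ih t (acc + 1) (by simp at h; omega)]
          simp
          omega
        · have hpre : [c].isPrefixOf (x :: t) = false := by
            simp [List.isPrefixOf]; exact fun hh => hx hh.symm
          rw [hpre]
          simp only [Bool.false_eq_true, if_false]
          rw [ih t acc (by simp at h; omega)]
          simp [hx]
  simp [PySem.Chars.count, go cs.length cs 0 le_rfl]

-- the five character counts add up to the vowel countP
lemma pv_vowel_sum (cs : List Char) :
    cs.count 'a' + cs.count 'e' + cs.count 'i' + cs.count 'o' + cs.count 'u' = cs.countP pvVowel := by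
  induction cs with
  | nil => rfl
  | cons c t ih =>
    simp only [List.count_cons, List.countP_cons, pvVowel]
    by_cases h1 : c = 'a' <;> by_cases h2 : c = 'e' <;> by_cases h3 : c = 'i' <;>
      by_cases h4 : c = 'o' <;> by_cases h5 : c = 'u' <;>
      simp_all <;> omega

-- membership in pvPairs as indexed adjacency
lemma pv_mem_pairs (cs : List Char) (a b : Char) :
    (a, b) ∈ pvPairs cs ↔ ∃ i, ∃ _ : i + 1 < cs.length, cs[i] = a ∧ cs[i + 1] = b := by
  unfold pvPairs
  rw [List.mem_iff_getElem]
  constructor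
  · rintro ⟨i, hi, hget⟩
    have hi' : i + 1 < cs.length := by
      simp [List.length_zip, List.length_tail] at hi; omega
    refine ⟨i, hi', ?_⟩
    rw [List.getElem_zip] at hget
    rcases Prod.mk.inj hget with ⟨h1, h2⟩
    exact ⟨h1, by rw [← h2, List.getElem_tail]⟩
  · rintro ⟨i, hi, h1, h2⟩
    refine ⟨i, by simp [List.length_zip, List.length_tail]; omega, ?_⟩
    rw [List.getElem_zip]
    simp [List.getElem_tail, h1, h2]

-- A's four substring tests are exactly B's bad-adjacent-pair test
lemma pv_bad_any (cs : List Char) :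
    (["ab", "cd", "pq", "xy"].any (fun x => PySem.Chars.isIn x.toList cs)) =
      (pvPairs cs).any (fun p => pvBadPair p.1 p.2) := by
  rw [Bool.eq_iff_iff, List.any_eq_true, List.any_eq_true]
  constructor
  · rintro ⟨x, hx, hin⟩
    have hinf := (PySem.Chars.isIn_iff_infix _ _).mp hin
    fin_cases hx <;>
      [exact ⟨_, (pv_infix_pair 'a' 'b' cs).mp (by simpa using hinf), by simp [pvBadPair]⟩;
       exact ⟨_, (pv_infix_pair 'c' 'd' cs).mp (by simpa using hinf), by simp [pvBadPair]⟩;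
       exact ⟨_, (pv_infix_pair 'p' 'q' cs).mp (by simpa using hinf), by simp [pvBadPair]⟩;
       exact ⟨_, (pv_infix_pair 'x' 'y' cs).mp (by simpa using hinf), by simp [pvBadPair]⟩]
  · rintro ⟨⟨a, b⟩, hm, hbad⟩
    simp only [pvBadPair, Bool.or_eq_true, Bool.and_eq_true, beq_iff_eq] at hbad
    rcases hbad with ((⟨rfl, rfl⟩ | ⟨rfl, rfl⟩) | ⟨rfl, rfl⟩) | ⟨rfl, rfl⟩
    · exact ⟨"ab", by simp, (PySem.Chars.isIn_iff_infix _ _).mpr (by simpa using (pv_infix_pair 'a' 'b' cs).mpr hm)⟩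
    · exact ⟨"cd", by simp, (PySem.Chars.isIn_iff_infix _ _).mpr (by simpa using (pv_infix_pair 'c' 'd' cs).mpr hm)⟩
    · exact ⟨"pq", by simp, (PySem.Chars.isIn_iff_infix _ _).mpr (by simpa using (pv_infix_pair 'p' 'q' cs).mpr hm)⟩
    · exact ⟨"xy", by simp, (PySem.Chars.isIn_iff_infix _ _).mpr (by simpa using (pv_infix_pair 'x' 'y' cs).mpr hm)⟩

-- A's index scan for a double is exactly B's adjacent-equality test
lemma pv_adj_any (cs : List Char) :
    ((PySem.List.pyRange 0 ((cs.length : Int) - 1) 1).any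
        (fun i => PySem.List.pyGetD cs i ' ' == PySem.List.pyGetD cs (i + 1) ' ')) =
      (pvPairs cs).any (fun p => p.1 == p.2) := by
  rw [Bool.eq_iff_iff, List.any_eq_true, List.any_eq_true]
  constructor
  · rintro ⟨i, hi, heq⟩
    rw [PySem.List.mem_pyRange_one] at hi
    obtain ⟨h0, hlt⟩ := hi
    rw [PySem.List.pyGetD_eq_getElem cs ' ' h0 (by omega),
        PySem.List.pyGetD_eq_getElem cs ' ' (by omega) (by omega)] at heq
    refine ⟨(cs[i.toNat], cs[(i + 1).toNat]), ?_, heq⟩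
    rw [pv_mem_pairs]
    have hh : (i + 1).toNat = i.toNat + 1 := by omega
    exact ⟨i.toNat, by omega, rfl, by simp [hh]⟩
  · rintro ⟨⟨a, b⟩, hm, heq⟩
    rw [pv_mem_pairs] at hm
    obtain ⟨i, hi, h1, h2⟩ := hm
    refine ⟨(i : Int), PySem.List.mem_pyRange_one.mpr ⟨by omega, by omega⟩, ?_⟩
    rw [PySem.List.pyGetD_eq_getElem cs ' ' (by omega) (by omega),
        PySem.List.pyGetD_eq_getElem cs ' ' (by omega) (by omega)]
    have hh : ((i : Int) + 1).toNat = i + 1 := by omega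
    simp only [Int.toNat_natCast, hh, h1, h2]
    exact heq

-- ===== VERDICT (by name: the statement is the Claim_ definition above) =====
theorem is_nice_1_spec : Claim_equal_is_nice_1 := by
  intro word _
  unfold Spec_is_nice_1 is_nice_1 is_nice_1_alt
  rw [pvGoB_eq]
  have hcs : ("aeiou".toList) = ['a', 'e', 'i', 'o', 'u'] := rfl
  rw [hcs]
  simp only [List.map_cons, List.map_nil, List.sum_cons, List.sum_nil,
    pv_count_singleton, PySem.Str.isIn_eq, PySem.Str.len_eq, pv_bad_any, pv_adj_any]
  rw [← pv_vowel_sum]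
  by_cases hb : (pvPairs word.toList).any (fun p => pvBadPair p.1 p.2) = true
  · simp [hb]
  · simp only [hb, Bool.false_eq_true, if_false, Bool.false_or, Nat.zero_add]
    by_cases hd : (pvPairs word.toList).any (fun p => p.1 == p.2) = true <;>
      by_cases h3 : word.toList.count 'a' + word.toList.count 'e' + word.toList.count 'i'
          + word.toList.count 'o' + word.toList.count 'u' < 3 <;>
      simp [hd, h3] <;> simp only [← Nat.add_assoc] <;> simp [← decide_not, Nat.not_le]
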